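-- pv_equiv track=rewrite | github.com/FabianHartman/AdventOfCode2023 | Day12/day12a.py | countConsecutiveHashes
-- ===== SOURCE A (Python) =====
-- def countConsecutiveHashes(record):
--     consecutiveString = ""
--     current_consecutive = 0
--     for char in record:
--         if char == "#":
--             current_consecutive += 1
--         else:
--             if current_consecutive > 0:
--                 consecutiveString += f",{current_consecutive}"
--             current_consecutive = 0
--     if current_consecutive > 0:
--         consecutiveString += f",{current_consecutive}"
--     return consecutiveString[1:]
-- ===== SOURCE B (Python) =====
-- def countConsecutiveHashes(record):
--     # group-then-map decomposition: locate each maximal run of '#' by scanning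
--     # to its end, collect the run lengths, then join them with commas.
--     lengths = []
--     i, n = 0, len(record)
--     while i < n:
--         if record[i] != '#':
--             i += 1
--         else:
--             j = i
--             while j < n and record[j] == '#':
--                 j += 1
--             lengths.append(str(j - i))
--             i = j
--     return ",".join(lengths)
-- ===== Notes on version B (the rewrite author's own statement) =====
-- stated objective: idiomatic
-- what changed: Replaces A's single character loop that threads a running counter and builds the result string by repeated concatenation (then strips the leading comma) with a two-phase group-then-map pass: scan out each maximal hash run, collect the run lengths in a list, and join them once with commas.
import Mathlib
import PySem

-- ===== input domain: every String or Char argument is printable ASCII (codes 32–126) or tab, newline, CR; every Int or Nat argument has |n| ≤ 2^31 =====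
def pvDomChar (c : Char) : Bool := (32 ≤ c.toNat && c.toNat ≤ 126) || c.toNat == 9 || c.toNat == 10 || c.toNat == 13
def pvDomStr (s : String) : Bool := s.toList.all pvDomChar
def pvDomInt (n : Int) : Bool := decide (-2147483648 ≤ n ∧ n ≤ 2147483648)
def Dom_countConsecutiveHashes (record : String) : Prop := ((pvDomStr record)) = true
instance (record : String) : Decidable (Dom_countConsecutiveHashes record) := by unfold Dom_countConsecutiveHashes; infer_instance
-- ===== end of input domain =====

-- B replaces A's running-counter loop with repeated string concatenation by a
-- group-then-map pass: scan out each maximal '#' run, collect the lengths, join once.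


-- ===== PORT A =====
-- one step of A's for-loop: state = (consecutiveString, current_consecutive)
def pvStepA (st : List Char × Int) (ch : Char) : List Char × Int :=
  if ch = '#' then (st.1, st.2 + 1)
  else (if st.2 > 0 then st.1 ++ ',' :: (PySem.Int.toStr st.2).toList else st.1, 0)

def countConsecutiveHashes (record : String) : String :=
  let st := record.toList.foldl pvStepA ([], 0)
  let s := if st.2 > 0 then st.1 ++ ',' :: (PySem.Int.toStr st.2).toList else st.1
  String.ofList (PySem.List.slice s (some 1) none)   -- consecutiveString[1:]

-- ===== PORT B =====
-- inner while loop of Source B: length (j - i) of the leading '#' run, and the remaining suffix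
def pvTakeRun : List Char → Int × List Char
  | [] => (0, [])
  | ch :: rest =>
    if ch = '#' then
      let p := pvTakeRun rest
      (p.1 + 1, p.2)
    else (0, ch :: rest)

theorem pvTakeRun_len : ∀ l : List Char, (pvTakeRun l).2.length ≤ l.length := by
  intro l
  induction l with
  | nil => simp [pvTakeRun]
  | cons ch rest ih =>
    by_cases h : ch = '#'
    · simp [pvTakeRun, h]; omega
    · simp [pvTakeRun, h]

-- outer while loop of Source B (index scan ported as recursion on the remaining suffix; exact)
def pvRunsB : List Char → List Int
  | [] => []
  | ch :: rest =>
    if ch = '#' then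
      let p := pvTakeRun rest
      (p.1 + 1) :: pvRunsB p.2
    else pvRunsB rest
  termination_by l => l.length
  decreasing_by
  · exact Nat.lt_succ_of_le (pvTakeRun_len rest)
  · simp

def countConsecutiveHashes_alt (record : String) : String :=
  PySem.Str.join "," ((pvRunsB record.toList).map PySem.Int.toStr)

-- ===== PRECONDITION & SPEC =====
def Spec_countConsecutiveHashes (record : String) (out : String) : Prop := out = countConsecutiveHashes_alt record
instance (record : String) (out : String) : Decidable (Spec_countConsecutiveHashes record out) := by unfold Spec_countConsecutiveHashes; infer_instance

-- ===== CLAIM (what is proved, stated in full; the proofs are below) =====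
def Claim_equal_countConsecutiveHashes : Prop := ∀ (record : String), Dom_countConsecutiveHashes record → Spec_countConsecutiveHashes record (countConsecutiveHashes record)

-- ===== LEMMAS AND PROOFS =====

-- run lengths of l with a pending run of c hashes already open (A's loop state, abstracted)
def pvRunsFrom : Int → List Char → List Int
  | c, [] => if c > 0 then [c] else []
  | c, ch :: rest =>
    if ch = '#' then pvRunsFrom (c + 1) rest
    else if c > 0 then c :: pvRunsFrom 0 rest else pvRunsFrom 0 rest

def pvTag (rs : List Int) : List Char :=
  rs.flatMap (fun n => ',' :: (PySem.Int.toStr n).toList)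

theorem pvRunsFrom_cons_hash (c : Int) (rest : List Char) :
    pvRunsFrom c ('#' :: rest) = pvRunsFrom (c + 1) rest := by
  simp [pvRunsFrom]

theorem pvRunsB_cons_hash (rest : List Char) :
    pvRunsB ('#' :: rest) = ((pvTakeRun rest).1 + 1) :: pvRunsB (pvTakeRun rest).2 := by
  rw [pvRunsB]; simp

theorem pvRunsB_cons_other (ch : Char) (rest : List Char) (h : ¬ ch = '#') :
    pvRunsB (ch :: rest) = pvRunsB rest := by
  rw [pvRunsB]; simp [h]

-- A's fold, flushed, appends exactly the tagged run lengths
theorem pvFoldA_char :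
    ∀ (l : List Char) (s : List Char) (c : Int),
      (let st := l.foldl pvStepA (s, c);
       if st.2 > 0 then st.1 ++ ',' :: (PySem.Int.toStr st.2).toList else st.1)
      = s ++ pvTag (pvRunsFrom c l) := by
  intro l
  induction l with
  | nil =>
    intro s c
    by_cases h : c > 0 <;> simp [pvRunsFrom, pvTag, h]
  | cons ch rest ih =>
    intro s c
    by_cases h : ch = '#'
    · simp only [List.foldl_cons, pvStepA, if_pos h, pvRunsFrom]
      exact ih s (c + 1)
    · by_cases hc : c > 0
      · simp only [List.foldl_cons, pvStepA, pvRunsFrom]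
        rw [if_neg h, if_neg h, if_pos hc, if_pos hc]
        rw [ih (s ++ ',' :: (PySem.Int.toStr c).toList) 0]
        simp [pvTag, List.append_assoc]
      · simp only [List.foldl_cons, pvStepA, pvRunsFrom]
        rw [if_neg h, if_neg h, if_neg hc, if_neg hc]
        exact ih s 0

-- pvRunsFrom with no pending run is B's run list; with a pending run it closes it via pvTakeRun
theorem pvRunsFrom_eq_runsB_aux :
    ∀ (n : Nat) (l : List Char), l.length ≤ n →
      pvRunsFrom 0 l = pvRunsB l ∧
      ∀ c : Int, 0 ≤ c →
        pvRunsFrom (c + 1) l = (c + 1 + (pvTakeRun l).1) :: pvRunsB (pvTakeRun l).2 := by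
  intro n
  induction n with
  | zero =>
    intro l hl
    have hnil : l = [] := by cases l <;> simp_all
    subst hnil
    refine ⟨by simp [pvRunsFrom, pvRunsB], fun c hc => ?_⟩
    simp [pvRunsFrom, pvTakeRun, pvRunsB]
    omega
  | succ n ih =>
    intro l hl
    cases l with
    | nil =>
      refine ⟨by simp [pvRunsFrom, pvRunsB], fun c hc => ?_⟩
      simp [pvRunsFrom, pvTakeRun, pvRunsB]
      omega
    | cons ch rest =>
      have hrest : rest.length ≤ n := by simp at hl; omega
      have ihrest := ih rest hrest
      by_cases h : ch = '#'
      · subst h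
        constructor
        · have h0 := ihrest.2 0 le_rfl
          simp only [zero_add] at h0
          rw [pvRunsFrom_cons_hash, pvRunsB_cons_hash, show (0 : Int) + 1 = 1 from by ring, h0]
          congr 1
          omega
        · intro c hc
          have h1 := ihrest.2 (c + 1) (by omega)
          rw [pvRunsFrom_cons_hash, h1]
          simp only [pvTakeRun, if_true]
          congr 1
          omega
      · constructor
        · simp [pvRunsFrom, h, pvRunsB_cons_other ch rest h, ihrest.1]
        · intro c hc
          have hpos : c + 1 > 0 := by omega
          simp only [pvRunsFrom, pvTakeRun]
          rw [if_neg h, if_neg h, if_pos hpos, pvRunsB_cons_other ch rest h, ihrest.1]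
          simp

theorem pvRunsFrom_eq_runsB (l : List Char) : pvRunsFrom 0 l = pvRunsB l :=
  (pvRunsFrom_eq_runsB_aux l.length l le_rfl).1

-- dropping the leading comma of the tagged concatenation is the comma-join
theorem pvTag_tail (rs : List Int) :
    (pvTag rs).tail =
      List.intercalate [','] (rs.map (fun n => (PySem.Int.toStr n).toList)) := by
  have hjoin : ∀ (x : List Char) (xs : List (List Char)),
      List.intercalate [','] (x :: xs) = x ++ xs.flatMap (fun y => ',' :: y) := by
    intro x xs
    induction xs generalizing x with
    | nil => simp [List.intercalate]
    | cons y ys ih =>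
      simp [List.intercalate, List.intersperse] at *
      simp [ih]
  cases rs with
  | nil => simp [pvTag, List.intercalate]
  | cons r rest =>
    simp [pvTag, hjoin, List.flatMap_cons, List.flatMap_map]

-- ===== VERDICT (by name: the statement is the Claim_ definition above) =====
theorem countConsecutiveHashes_spec : Claim_equal_countConsecutiveHashes := by
  intro record _
  unfold Spec_countConsecutiveHashes countConsecutiveHashes countConsecutiveHashes_alt
  have hfold := pvFoldA_char record.toList [] 0
  simp only [List.nil_append] at hfold
  simp only [hfold, PySem.List.slice_from_one, pvRunsFrom_eq_runsB]
  apply String.ext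
  rw [PySem.Str.toList_join]
  simp only [String.toList_ofList, List.map_map, PySem.Chars.join]
  rw [pvTag_tail]
  rfl
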